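-- pv_equiv track=rewrite | github.com/Kulinkovich-1234/Character-Calculator | character table decomposer_v1.2.0.py | conjugate_classes_sn
-- ===== SOURCE A (Python) =====
-- from collections import Counter
-- import math
--
-- def conjugate_classes_sn(n):
--     """找出对称群 S_n 的所有共轭类（循环型）及其大小"""
--     classes = []
--
--     def generate_partitions(remaining, max_part, current):
--         if remaining == 0:
--             process_partition(current.copy())
--             return
--
--         for part in range(min(max_part, remaining), 0, -1):
--             current.append(part)
--             generate_partitions(remaining - part, part, current)
--             current.pop()
--
--     def process_partition(partition):
--         cycle_counts = Counter(partition)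
--         m = len(partition)
--         sign_factor = (-1) ** (n + m)
--
--         denominator = 1
--         for cycle_length, count in cycle_counts.items():
--             denominator *= (cycle_length ** count) * math.factorial(count)
--
--         class_size = math.factorial(n) // denominator
--
--         desc_parts = []
--         for cycle_length in sorted(cycle_counts.keys(), reverse=True):
--             count = cycle_counts[cycle_length]
--             if count == 1:
--                 desc_parts.append(f"({cycle_length})")
--             else:
--                 desc_parts.append(f"({cycle_length})^{count}")
--
--         cycle_type_desc = "·".join(desc_parts)
--
--         classes.append((cycle_type_desc, partition.copy(), class_size, sign_factor))
--
--     generate_partitions(n, n, [])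
--     classes.sort(key=lambda x: (len(x[1]), x[1]), reverse=True)
--     return classes
-- ===== SOURCE B (Python) =====
-- import math
--
-- def conjugate_classes_sn(n):
--     """Iterative (explicit-stack) enumeration of the conjugacy classes of S_n."""
--     classes = []
--     stack = [(n, n, [])]
--     while stack:
--         remaining, max_part, current = stack.pop()
--         if remaining == 0:
--             runs = []  # run-length encoding of the descending partition
--             for part in current:
--                 if runs and runs[-1][0] == part:
--                     runs[-1][1] += 1
--                 else:
--                     runs.append([part, 1])
--             denominator = 1
--             desc_parts = []
--             for length, count in runs:
--                 denominator *= length ** count * math.factorial(count)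
--                 desc_parts.append(f"({length})" if count == 1 else f"({length})^{count}")
--             classes.append(("·".join(desc_parts), current,
--                             math.factorial(n) // denominator,
--                             (-1) ** (n + len(current))))
--         else:
--             for part in range(1, min(max_part, remaining) + 1):
--                 stack.append((remaining - part, part, current + [part]))
--     classes.sort(key=lambda x: (len(x[1]), x[1]), reverse=True)
--     return classes
-- ===== Notes on version B (the rewrite author's own statement) =====
-- stated objective: alternative
-- what changed: The recursive partition generator with a shared mutable 'current' is replaced by an iterative explicit-stack DFS, and the Counter-based centralizer computation is replaced by a single run-length-encoding pass over the (descending) partition that yields the denominator and the description in one loop.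
import Mathlib
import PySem

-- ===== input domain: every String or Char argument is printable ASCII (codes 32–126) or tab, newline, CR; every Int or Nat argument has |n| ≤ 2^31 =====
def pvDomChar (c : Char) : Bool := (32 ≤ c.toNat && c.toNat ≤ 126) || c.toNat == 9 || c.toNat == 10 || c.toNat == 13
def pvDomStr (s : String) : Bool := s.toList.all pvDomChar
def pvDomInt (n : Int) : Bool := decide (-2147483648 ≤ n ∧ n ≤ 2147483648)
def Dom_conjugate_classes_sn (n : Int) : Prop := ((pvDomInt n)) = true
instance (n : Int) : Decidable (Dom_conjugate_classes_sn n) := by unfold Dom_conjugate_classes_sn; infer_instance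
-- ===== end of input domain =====

-- B replaces A's recursive partition generator by an explicit-stack DFS and the Counter-based
-- per-partition computation by one run-length-encoding pass; same return value (objective: alternative).

-- math.factorial(k): both Pythons only call it on nonnegative arguments, where this is exact.
def pyFactorial (k : Int) : Int := (Nat.factorial k.toNat : Int)

-- ===== PORT A =====
-- process_partition: the Counter-based computation. Counter lookup cycle_counts[k] is ported as
-- getD k 0, exact here since only existing keys are looked up; (-1) ** (n + m) has n + m ≥ 0 at
-- every call (partitions of n exist only for n ≥ 0), where toNat is exact.
def processPartitionA (n : Int) (partition : List Int) : String × List Int × Int × Int :=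
  let cycle_counts := PySem.Dict.counter partition
  let m : Int := partition.length
  let sign_factor : Int := (-1) ^ (n + m).toNat
  let denominator : Int :=
    cycle_counts.items.foldl (fun acc p => acc * (p.1 ^ p.2.toNat * pyFactorial p.2)) 1
  let class_size : Int := PySem.Int.floordiv (pyFactorial n) denominator
  let desc_parts : List String :=
    (PySem.List.sorted cycle_counts.keys (fun k => k) true).foldl
      (fun acc k =>
        let count := cycle_counts.getD k 0
        acc ++ [if count = 1 then "(" ++ PySem.Int.toStr k ++ ")"
                else "(" ++ PySem.Int.toStr k ++ ")^" ++ PySem.Int.toStr count]) []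
  (PySem.Str.join "·" desc_parts, partition, class_size, sign_factor)

-- generate_partitions, with the `classes` accumulator threaded through
def generatePartitionsA (n remaining max_part : Int) (current : List Int)
    (classes : List (String × List Int × Int × Int)) : List (String × List Int × Int × Int) :=
  if remaining = 0 then classes ++ [processPartitionA n current]
  else
    ((PySem.List.pyRange (min max_part remaining) 0 (-1)).attach).foldl
      (fun cls pp => generatePartitionsA n (remaining - pp.1) pp.1 (current ++ [pp.1]) cls) classes
termination_by remaining.toNat
decreasing_by
  have h := PySem.List.mem_pyRange_neg_one.mp pp.2
  omega

def conjugate_classes_sn (n : Int) : List (String × List Int × Int × Int) :=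
  PySem.List.sorted2 (generatePartitionsA n n n [] [])
    (fun x => (x.2.1.length : Int)) (fun x => x.2.1) true

-- ===== PORT B =====
-- the while-stack loop of Source B; `fuel` only bounds the number of iterations (2 ^ n.toNat is
-- proved sufficient below) — the Python loop needs none.
def loopB (n : Int) (fuel : Nat) (stack : List (Int × Int × List Int))
    (classes : List (String × List Int × Int × Int)) : List (String × List Int × Int × Int) :=
  match fuel, stack with
  | _, [] => classes
  | 0, _ :: _ => classes
  | f + 1, (remaining, max_part, current) :: rest =>
    if remaining = 0 then
      let runs : List (Int × Int) :=
        current.foldl (fun runs part =>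
          if runs ≠ [] ∧ (runs.getLastD (0, 0)).1 = part then
            runs.dropLast ++ [(part, (runs.getLastD (0, 0)).2 + 1)]
          else runs ++ [(part, 1)]) []
      let dd : Int × List String :=
        runs.foldl (fun acc pr =>
          (acc.1 * (pr.1 ^ pr.2.toNat * pyFactorial pr.2),
           acc.2 ++ [if pr.2 = 1 then "(" ++ PySem.Int.toStr pr.1 ++ ")"
                     else "(" ++ PySem.Int.toStr pr.1 ++ ")^" ++ PySem.Int.toStr pr.2])) (1, [])
      loopB n f rest
        (classes ++ [(PySem.Str.join "·" dd.2, current,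
                      PySem.Int.floordiv (pyFactorial n) dd.1,
                      (-1) ^ (n + current.length).toNat)])
    else
      loopB n f
        ((PySem.List.pyRange 1 (min max_part remaining + 1) 1).foldl
          (fun st part => (remaining - part, part, current ++ [part]) :: st) rest) classes

def conjugate_classes_sn_alt (n : Int) : List (String × List Int × Int × Int) :=
  PySem.List.sorted2 (loopB n (2 ^ n.toNat) [(n, n, [])] [])
    (fun x => (x.2.1.length : Int)) (fun x => x.2.1) true

-- ===== PRECONDITION & SPEC =====
def Spec_conjugate_classes_sn (n : Int) (out : List (String × List Int × Int × Int)) : Prop := out = conjugate_classes_sn_alt n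
instance (n : Int) (out : List (String × List Int × Int × Int)) : Decidable (Spec_conjugate_classes_sn n out) := by unfold Spec_conjugate_classes_sn; infer_instance

-- ===== CLAIM (what is proved, stated in full; the proofs are below) =====
def Claim_equal_conjugate_classes_sn : Prop := ∀ (n : Int), Dom_conjugate_classes_sn n → Spec_conjugate_classes_sn n (conjugate_classes_sn n)

-- ===== LEMMAS AND PROOFS =====

-- the common specification object: the partitions of `remaining` with parts ≤ max_part,
-- descending, in A's DFS order
def genParts (remaining max_part : Int) : List (List Int) :=
  if remaining = 0 then [[]]
  else
    ((PySem.List.pyRange (min max_part remaining) 0 (-1)).attach).flatMap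
      (fun pp => (genParts (remaining - pp.1) pp.1).map (fun s => pp.1 :: s))
termination_by remaining.toNat
decreasing_by
  have h := PySem.List.mem_pyRange_neg_one.mp pp.2
  omega

lemma genParts_zero (m : Int) : genParts 0 m = [[]] := by
  rw [genParts]; simp

lemma genA_foldl_attach (n r : Int) (c : List Int)
    (cls : List (String × List Int × Int × Int)) (l : List Int) :
    l.attach.foldl (fun cls' pp => generatePartitionsA n (r - pp.1) pp.1 (c ++ [pp.1]) cls') cls
      = l.foldl (fun cls' part => generatePartitionsA n (r - part) part (c ++ [part]) cls') cls := by
  conv_rhs => rw [← List.attach_map_subtype_val l]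
  rw [List.foldl_map]

lemma genParts_ne {r : Int} (m : Int) (h : r ≠ 0) :
    genParts r m = (PySem.List.pyRange (min m r) 0 (-1)).flatMap
      (fun part => (genParts (r - part) part).map (fun s => part :: s)) := by
  conv_lhs => rw [genParts]
  rw [if_neg h]
  conv_rhs => rw [← List.attach_map_subtype_val (PySem.List.pyRange (min m r) 0 (-1))]
  rw [List.flatMap_map]

-- B's run-length-encoding loop, as in loopB
def rleRuns (current : List Int) : List (Int × Int) :=
  current.foldl (fun runs part =>
    if runs ≠ [] ∧ (runs.getLastD (0, 0)).1 = part then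
      runs.dropLast ++ [(part, (runs.getLastD (0, 0)).2 + 1)]
    else runs ++ [(part, 1)]) []

lemma ofList_sublist (p : List Int) : (PySem.Set.ofList p).Sublist p := by
  induction p using List.reverseRecOn with
  | nil => simp [PySem.Set.ofList_nil]
  | append_singleton p x ih =>
    rw [PySem.Set.ofList_append_singleton]
    by_cases hx : x ∈ PySem.Set.ofList p
    · rw [PySem.Set.add_of_mem hx]
      exact ih.trans (List.sublist_append_left p [x])
    · rw [PySem.Set.add_of_not_mem hx]
      exact ih.append (List.Sublist.refl [x])

lemma rleRuns_append (p : List Int) (x : Int) :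
    rleRuns (p ++ [x]) =
      (if rleRuns p ≠ [] ∧ ((rleRuns p).getLastD (0, 0)).1 = x then
        (rleRuns p).dropLast ++ [(x, ((rleRuns p).getLastD (0, 0)).2 + 1)]
      else rleRuns p ++ [(x, 1)]) := by
  simp [rleRuns, List.foldl_append]

lemma rleRuns_eq (p : List Int) (h : p.Pairwise (fun a b => b ≤ a)) :
    rleRuns p = (PySem.Set.ofList p).map (fun k => (k, (p.count k : Int))) := by
  induction p using List.reverseRecOn with
  | nil => simp [rleRuns, PySem.Set.ofList_nil]
  | append_singleton p x ih =>
    rw [List.pairwise_append] at h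
    obtain ⟨hp, -, hxle⟩ := h
    have hxall : ∀ y ∈ p, x ≤ y := fun y hy => hxle y hy x (by simp)
    rw [rleRuns_append, ih hp, PySem.Set.ofList_append_singleton]
    have hsub := ofList_sublist p
    have hpair' : (PySem.Set.ofList p).Pairwise (fun a b => b ≤ a) := hp.sublist hsub
    have hnd : (PySem.Set.ofList p).Nodup := PySem.Set.nodup_ofList p
    by_cases hx : x ∈ p
    · have hxs : x ∈ PySem.Set.ofList p := (PySem.Set.mem_ofList p x).mpr hx
      rw [PySem.Set.add_of_mem hxs]
      have hne : PySem.Set.ofList p ≠ [] := List.ne_nil_of_mem hxs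
      have hdec := List.dropLast_append_getLast hne
      have hlast : (PySem.Set.ofList p).getLast hne = x := by
        by_cases hmem : x ∈ (PySem.Set.ofList p).dropLast
        · have hpair2 := hpair'
          rw [← hdec, List.pairwise_append] at hpair2
          have h2 := hpair2.2.2 x hmem ((PySem.Set.ofList p).getLast hne) (by simp)
          have h1 : x ≤ (PySem.Set.ofList p).getLast hne :=
            hxall _ (hsub.subset (List.getLast_mem hne))
          omega
        · have hx2 : x ∈ (PySem.Set.ofList p).dropLast ++ [(PySem.Set.ofList p).getLast hne] := by
            rw [hdec]; exact hxs
          rcases List.mem_append.mp hx2 with h' | h'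
          · exact absurd h' hmem
          · simp at h'; omega
      have hxnotinit : x ∉ (PySem.Set.ofList p).dropLast := by
        intro hmem
        have hnd2 := hnd
        rw [← hdec, List.nodup_append] at hnd2
        exact hnd2.2.2 x hmem x (by simp [hlast]) rfl
      rw [← hdec, hlast]
      simp only [List.map_append, List.map_cons, List.map_nil]
      rw [if_pos ?_]
      · rw [List.getLastD_concat, List.dropLast_concat]
        congr 1
        · apply List.map_congr_left
          intro k hk
          have hkx : k ≠ x := fun he => hxnotinit (he ▸ hk)
          simp [List.count_append, List.count_singleton']
          omega
        · simp [List.count_append]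
      · constructor
        · simp
        · rw [List.getLastD_concat]
    · have hxs : x ∉ PySem.Set.ofList p := fun hc => hx ((PySem.Set.mem_ofList p x).mp hc)
      rw [PySem.Set.add_of_not_mem hxs]
      have hmapeq : (PySem.Set.ofList p).map (fun k => (k, ((p ++ [x]).count k : Int))) =
          (PySem.Set.ofList p).map (fun k => (k, (p.count k : Int))) := by
        apply List.map_congr_left
        intro k hk
        have hkx : k ≠ x := fun he => hxs (he ▸ hk)
        simp [List.count_append, List.count_singleton']
        omega
      rcases List.eq_nil_or_concat (PySem.Set.ofList p) with hnil | ⟨init, last, hdec⟩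
      · rw [hnil]
        simp [List.count_append, List.count_eq_zero.mpr hx]
      · have hlastx : last ≠ x := by
          intro he
          apply hxs
          rw [hdec, he]; simp
        rw [if_neg ?_]
        · rw [List.map_append, hmapeq]
          congr 2
          simp [List.count_append, List.count_eq_zero.mpr hx]
        · rw [hdec]
          simp [hlastx]

lemma genParts_shape : ∀ (N : Nat) (r m : Int), r.toNat ≤ N → ∀ p ∈ genParts r m,
    (∀ x ∈ p, 0 < x ∧ x ≤ m) ∧ p.Pairwise (fun a b => b ≤ a) := by
  intro N
  induction N with
  | zero =>
    intro r m hr p hp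
    by_cases h0 : r = 0
    · subst h0; rw [genParts_zero] at hp; simp at hp; subst hp; simp
    · rw [genParts_ne m h0, PySem.List.pyRange_neg_one_eq_nil (by omega)] at hp
      simp at hp
  | succ N ih =>
    intro r m hr p hp
    by_cases h0 : r = 0
    · subst h0; rw [genParts_zero] at hp; simp at hp; subst hp; simp
    · rw [genParts_ne m h0] at hp
      rw [List.mem_flatMap] at hp
      obtain ⟨part, hpart, hp⟩ := hp
      rw [List.mem_map] at hp
      obtain ⟨s, hs, rfl⟩ := hp
      have hb := PySem.List.mem_pyRange_neg_one.mp hpart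
      have hrec := ih (r - part) part (by omega) s hs
      constructor
      · intro x hx
        rcases List.mem_cons.mp hx with rfl | hx
        · exact ⟨hb.1, by omega⟩
        · have := hrec.1 x hx; exact ⟨this.1, by omega⟩
      · rw [List.pairwise_cons]
        exact ⟨fun s' hs' => (hrec.1 s' hs').2, hrec.2⟩

-- B's per-partition block, named so that the loop invariant can be stated
def processPartitionB (n : Int) (current : List Int) : String × List Int × Int × Int :=
  let dd : Int × List String :=
    (rleRuns current).foldl (fun acc pr =>
      (acc.1 * (pr.1 ^ pr.2.toNat * pyFactorial pr.2),
       acc.2 ++ [if pr.2 = 1 then "(" ++ PySem.Int.toStr pr.1 ++ ")"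
                 else "(" ++ PySem.Int.toStr pr.1 ++ ")^" ++ PySem.Int.toStr pr.2])) (1, [])
  (PySem.Str.join "·" dd.2, current,
   PySem.Int.floordiv (pyFactorial n) dd.1,
   (-1) ^ (n + current.length).toNat)

lemma dd_split : ∀ (runs : List (Int × Int)) (i1 : Int) (i2 : List String),
    runs.foldl (fun acc pr =>
      (acc.1 * (pr.1 ^ pr.2.toNat * pyFactorial pr.2),
       acc.2 ++ [if pr.2 = 1 then "(" ++ PySem.Int.toStr pr.1 ++ ")"
                 else "(" ++ PySem.Int.toStr pr.1 ++ ")^" ++ PySem.Int.toStr pr.2])) (i1, i2)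
    = (runs.foldl (fun acc pr => acc * (pr.1 ^ pr.2.toNat * pyFactorial pr.2)) i1,
       i2 ++ runs.map (fun pr => if pr.2 = 1 then "(" ++ PySem.Int.toStr pr.1 ++ ")"
                 else "(" ++ PySem.Int.toStr pr.1 ++ ")^" ++ PySem.Int.toStr pr.2)) := by
  intro runs
  induction runs with
  | nil => intro i1 i2; simp
  | cons pr t ih => intro i1 i2; simp [List.foldl_cons, ih]

lemma process_eq (n : Int) (p : List Int) (h : p.Pairwise (fun a b => b ≤ a)) :
    processPartitionA n p = processPartitionB n p := by
  unfold processPartitionA processPartitionB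
  simp only [dd_split, rleRuns_eq p h, PySem.Dict.items_counter,
    PySem.Dict.keys_counter,
    PySem.List.sorted_rev_eq_self_of_pairwise _ _ (h.sublist (ofList_sublist p)),
    PySem.List.foldl_append_singleton_eq_map, List.map_map, Function.comp_def,
    PySem.Dict.getD_counter, List.nil_append]

-- invariant of A's recursion
lemma genA_spec (n : Int) : ∀ (N : Nat) (r m : Int), r.toNat ≤ N → ∀ c cls,
    generatePartitionsA n r m c cls =
      cls ++ (genParts r m).map (fun s => processPartitionA n (c ++ s)) := by
  intro N
  induction N with
  | zero =>
    intro r m hr c cls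
    by_cases h0 : r = 0
    · subst h0; rw [generatePartitionsA, genParts_zero]; simp
    · rw [generatePartitionsA, if_neg h0, genParts_ne m h0,
        PySem.List.pyRange_neg_one_eq_nil (by omega)]
      simp
  | succ N ih =>
    intro r m hr c cls
    by_cases h0 : r = 0
    · subst h0; rw [generatePartitionsA, genParts_zero]; simp
    · rw [generatePartitionsA, if_neg h0, genA_foldl_attach]
      have aux : ∀ (L : List Int), (∀ part ∈ L, 0 < part) →
          ∀ cls' : List (String × List Int × Int × Int),
          L.foldl (fun cls' part => generatePartitionsA n (r - part) part (c ++ [part]) cls') cls' =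
            cls' ++ L.flatMap (fun part => (genParts (r - part) part).map
              (fun s => processPartitionA n ((c ++ [part]) ++ s))) := by
        intro L
        induction L with
        | nil => intro _ cls'; simp
        | cons part t iht =>
          intro hL cls'
          rw [List.foldl_cons, ih (r - part) part
            (by have := hL part (by simp); omega) (c ++ [part]) cls',
            iht (fun q hq => hL q (List.mem_cons_of_mem _ hq))]
          simp [List.append_assoc]
      rw [aux (PySem.List.pyRange (min m r) 0 (-1))
        (fun q hq => ((PySem.List.mem_pyRange_neg_one).mp hq).1),
        genParts_ne m h0, List.map_flatMap]
      congr 1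
      apply List.flatMap_congr
      intro part hpart
      rw [List.map_map]
      apply List.map_congr_left
      intro s hs
      simp

-- stack measure for B's loop
def stackMeasure (st : List (Int × Int × List Int)) : Nat :=
  (st.map (fun e => 2 ^ e.1.toNat)).sum

lemma sumPow (r : Int) (hr : 0 < r) : ∀ (P : Int), P ≤ r →
    ((PySem.List.pyRange 1 (P + 1) 1).map (fun part => 2 ^ (r - part).toNat)).sum
      ≤ 2 ^ r.toNat - 1 := by
  have key : ∀ (k : Nat) (P : Int), P.toNat = k → 0 ≤ P → P ≤ r →
      ((PySem.List.pyRange 1 (P + 1) 1).map (fun part => 2 ^ (r - part).toNat)).sum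
        ≤ 2 ^ r.toNat - 2 ^ (r - P).toNat := by
    intro k
    induction k with
    | zero =>
      intro P hPk hP0 hPr
      have hP : P = 0 := by omega
      subst hP
      rw [PySem.List.pyRange_one_eq_nil (by omega)]
      simp
    | succ k ihk =>
      intro P hPk hP0 hPr
      have hsplit : PySem.List.pyRange 1 (P + 1) 1 =
          PySem.List.pyRange 1 P 1 ++ [P] := PySem.List.pyRange_one_succ_right (by omega)
      rw [hsplit, List.map_append, List.sum_append]
      have ihP := ihk (P - 1) (by omega) (by omega) (by omega)
      have hrw : P - 1 + 1 = P := by ring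
      rw [hrw] at ihP
      have hs : (r - (P - 1)).toNat = (r - P).toNat + 1 := by omega
      rw [hs] at ihP
      have h1 : 2 ^ ((r - P).toNat + 1) ≤ 2 ^ r.toNat :=
        Nat.pow_le_pow_right (by omega) (by omega)
      have h2 : 2 ^ ((r - P).toNat + 1) = 2 * 2 ^ (r - P).toNat := by ring
      simp only [List.map_cons, List.map_nil, List.sum_cons, List.sum_nil]
      omega
  intro P hPr
  by_cases hP : 0 ≤ P
  · have hk := key P.toNat P rfl hP hPr
    have hpos : 0 < 2 ^ (r - P).toNat := Nat.two_pow_pos _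
    omega
  · rw [PySem.List.pyRange_one_eq_nil (by omega)]
    have hpos : 0 < 2 ^ r.toNat := Nat.two_pow_pos _
    simp only [List.map_nil, List.sum_nil]
    omega

lemma foldl_cons_push {α β : Type} (g : α → β) : ∀ (L : List α) (st : List β),
    L.foldl (fun st part => g part :: st) st = (L.map g).reverse ++ st := by
  intro L
  induction L with
  | nil => intro st; rfl
  | cons x t ih => intro st; simp [List.foldl_cons, ih]

lemma loopB_spec (n : Int) : ∀ (fuel : Nat) (st : List (Int × Int × List Int)) cls,
    stackMeasure st ≤ fuel →
    loopB n fuel st cls =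
      cls ++ (st.map (fun e => (genParts e.1 e.2.1).map
        (fun s => processPartitionB n (e.2.2 ++ s)))).flatten := by
  intro fuel
  induction fuel with
  | zero =>
    intro st cls hm
    cases st with
    | nil => simp [loopB]
    | cons e rest =>
      exfalso
      have hpos : 0 < 2 ^ e.1.toNat := Nat.two_pow_pos _
      simp only [stackMeasure, List.map_cons, List.sum_cons, Nat.le_zero] at hm
      omega
  | succ f ih =>
    intro st cls hm
    cases st with
    | nil => simp [loopB]
    | cons e rest =>
      obtain ⟨r, m, c⟩ := e
      simp only [stackMeasure, List.map_cons, List.sum_cons] at hm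
      by_cases h0 : r = 0
      · subst h0
        norm_num at hm
        have step : loopB n (f + 1) ((0, m, c) :: rest) cls =
            loopB n f rest (cls ++ [processPartitionB n c]) := rfl
        rw [step, ih rest _ (by simp only [stackMeasure]; omega)]
        simp [genParts_zero]
      · have step : loopB n (f + 1) ((r, m, c) :: rest) cls =
            loopB n f
              ((PySem.List.pyRange 1 (min m r + 1) 1).foldl
                (fun st part => (r - part, part, c ++ [part]) :: st) rest) cls := by
          conv_lhs => rw [loopB]
          rw [if_neg h0]
        rw [step, foldl_cons_push]
        have hmeas : stackMeasure
            (((PySem.List.pyRange 1 (min m r + 1) 1).map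
              (fun part => (r - part, part, c ++ [part]))).reverse ++ rest) ≤ f := by
          simp only [stackMeasure, List.map_append, List.map_reverse, List.map_map,
            List.sum_append, List.sum_reverse, Function.comp_def]
          by_cases hr : 0 < r
          · have hsum := sumPow r hr (min m r) (by omega)
            have hpow : 0 < 2 ^ r.toNat := Nat.two_pow_pos _
            omega
          · rw [PySem.List.pyRange_one_eq_nil (by omega)]
            have hr0 : r.toNat = 0 := by omega
            rw [hr0] at hm
            norm_num at hm
            simp only [List.map_nil, List.sum_nil, Nat.zero_add]
            omega
        rw [ih _ cls hmeas]
        congr 1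
        simp only [List.map_append, List.flatten_append, List.map_cons, List.flatten_cons]
        congr 1
        rw [genParts_ne m h0, PySem.List.pyRange_neg_one_eq_reverse]
        have hz : (0 : Int) + 1 = 1 := by ring
        rw [hz, List.map_flatMap, List.flatMap_def, List.map_reverse, List.map_reverse]
        congr 1
        congr 1
        rw [List.map_map]
        apply List.map_congr_left
        intro part hpart
        simp

-- ===== VERDICT (by name: the statement is the Claim_ definition above) =====
theorem conjugate_classes_sn_spec : Claim_equal_conjugate_classes_sn := by
  intro n _
  unfold Spec_conjugate_classes_sn conjugate_classes_sn conjugate_classes_sn_alt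
  rw [genA_spec n n.toNat n n le_rfl [] []]
  rw [loopB_spec n (2 ^ n.toNat) [(n, n, [])] [] (by simp [stackMeasure])]
  simp only [List.map_cons, List.map_nil, List.flatten_cons, List.flatten_nil,
    List.append_nil, List.nil_append]
  congr 1
  apply List.map_congr_left
  intro s hs
  have hsh := (genParts_shape n.toNat n n le_rfl s hs).2
  simpa using process_eq n s hsh
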